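-- pv_equiv track=rewrite | github.com/rahult-github/nimble_compile_check | nimble_compile_check.py | _find_required_conflicts
-- ===== SOURCE A (Python) =====
-- BASE_CONFIG_DEFAULTS: dict[str, str] = {
--     'BT_ENABLED': 'y',
--     'BT_NIMBLE_ENABLED': 'y',
-- }
--
-- def _normalize_cfg_name(name: str) -> str:
--     return name[7:] if name.startswith('CONFIG_') else name
--
-- def _find_required_conflicts(
--     toggles: list[tuple[str, str]],
--     required_configs: dict[str, str],
--     flag_defaults: dict[str, str],
--     example_defaults: dict[str, str] | None = None,
-- ) -> list[tuple[str, str, str]]: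
--     """Return conflicts as (config_name, required_val, effective_val)."""
--     conflicts: list[tuple[str, str, str]] = []
--     for req_name, req_val in required_configs.items():
--         req_norm = _normalize_cfg_name(req_name)
--         effective_val = _effective_config_value(req_norm, toggles, flag_defaults, example_defaults)
--         if effective_val is not None and effective_val != req_val:
--             conflicts.append((req_norm, req_val, effective_val))
--     return conflicts
--
-- def _effective_config_value(
--     config_name: str,
--     toggles: list[tuple[str, str]],
--     flag_defaults: dict[str, str],
--     example_defaults: dict[str, str] | None = None,
-- ) -> str | None:
--     norm = _normalize_cfg_name(config_name)
--     toggle_map = {_normalize_cfg_name(name): val for name, val in toggles}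
--     if norm in toggle_map:
--         return toggle_map[norm]
--     if norm in BASE_CONFIG_DEFAULTS:
--         return BASE_CONFIG_DEFAULTS[norm]
--     if example_defaults and norm in example_defaults:
--         return example_defaults[norm]
--     return flag_defaults.get(norm)
-- ===== SOURCE B (Python) =====
-- BASE_CONFIG_DEFAULTS: dict[str, str] = {
--     'BT_ENABLED': 'y',
--     'BT_NIMBLE_ENABLED': 'y',
-- }
--
-- def _normalize_cfg_name(name: str) -> str:
--     return name[7:] if name.startswith('CONFIG_') else name
--
-- def _find_required_conflicts(
--     toggles: list[tuple[str, str]],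
--     required_configs: dict[str, str],
--     flag_defaults: dict[str, str],
--     example_defaults: dict[str, str] | None = None,
-- ) -> list[tuple[str, str, str]]:
--     """Return conflicts as (config_name, required_val, effective_val)."""
--     # One merged effective-config table; later overlays win, so the
--     # priority is toggles > BASE_CONFIG_DEFAULTS > example_defaults > flag_defaults.
--     merged = dict(flag_defaults)
--     merged.update(example_defaults or {})
--     merged.update(BASE_CONFIG_DEFAULTS)
--     merged.update((_normalize_cfg_name(name), val) for name, val in toggles)
--     conflicts: list[tuple[str, str, str]] = []
--     for req_name, req_val in required_configs.items():
--         req_norm = _normalize_cfg_name(req_name)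
--         effective = merged.get(_normalize_cfg_name(req_norm))
--         if effective is not None and effective != req_val:
--             conflicts.append((req_norm, req_val, effective))
--     return conflicts
-- ===== Notes on version B (the rewrite author's own statement) =====
-- stated objective: simpler
-- what changed: Replaces A's per-config four-branch fallback chain (toggle map rebuilt and probed per lookup, then BASE, example and flag dicts in turn) by one merged effective-config dict built once via overlay order flag < example < BASE < normalized toggles, followed by a single flat pass over required_configs.
import Mathlib
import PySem

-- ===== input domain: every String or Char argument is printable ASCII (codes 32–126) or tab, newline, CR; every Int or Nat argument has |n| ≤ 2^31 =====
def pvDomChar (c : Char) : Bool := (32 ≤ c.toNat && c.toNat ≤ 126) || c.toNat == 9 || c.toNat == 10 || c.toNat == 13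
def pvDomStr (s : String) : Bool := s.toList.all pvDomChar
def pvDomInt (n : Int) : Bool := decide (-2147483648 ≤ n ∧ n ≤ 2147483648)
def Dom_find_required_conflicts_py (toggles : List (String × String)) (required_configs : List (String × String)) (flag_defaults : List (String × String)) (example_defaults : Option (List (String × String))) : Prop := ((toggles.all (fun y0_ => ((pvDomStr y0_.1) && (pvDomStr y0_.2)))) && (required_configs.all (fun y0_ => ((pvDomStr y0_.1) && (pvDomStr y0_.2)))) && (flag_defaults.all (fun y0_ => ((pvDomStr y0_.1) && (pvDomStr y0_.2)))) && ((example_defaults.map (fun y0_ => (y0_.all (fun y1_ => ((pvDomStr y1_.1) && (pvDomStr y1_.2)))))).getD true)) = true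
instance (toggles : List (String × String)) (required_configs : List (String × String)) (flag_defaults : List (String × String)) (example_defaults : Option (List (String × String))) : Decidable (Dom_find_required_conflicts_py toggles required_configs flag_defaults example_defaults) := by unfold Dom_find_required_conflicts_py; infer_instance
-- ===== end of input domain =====

-- B replaces A's four-branch per-config fallback chain by ONE merged effective-config dict
-- (overlaid flag < example < BASE < toggles) built once, then a flat pass over required_configs
-- (objective: simpler). Return-value equivalence; neither version mutates its arguments.

-- ===== PORT A =====
-- shared module-level constant BASE_CONFIG_DEFAULTS (a dict literal)
def pvBaseDefaultsList : List (String × String) := [("BT_ENABLED", "y"), ("BT_NIMBLE_ENABLED", "y")]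
def pvBaseDefaults : PySem.Dict String String := PySem.Dict.mk pvBaseDefaultsList

-- _normalize_cfg_name
def pvNormCfg (name : String) : String :=
  if PySem.Str.startswith name "CONFIG_" then PySem.Str.slice name (some 7) none else name

-- local 'toggle_map' of _effective_config_value (a dict comprehension; later duplicates overwrite)
def pvToggleMap (toggles : List (String × String)) : PySem.Dict String String :=
  toggles.foldl (fun d p => d.insert (pvNormCfg p.1) p.2) PySem.Dict.empty

-- _effective_config_value (the local 'norm' is inlined as 'pvNormCfg config_name')
def pvEffectiveValue (config_name : String) (toggles : List (String × String)) (flag_defaults : List (String × String)) (example_defaults : Option (List (String × String))) : Option String :=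
  match (pvToggleMap toggles).get? (pvNormCfg config_name) with
  | some v => some v
  | none =>
    match pvBaseDefaults.get? (pvNormCfg config_name) with
    | some v => some v
    | none =>
      match example_defaults with
      | none => (PySem.Dict.mk flag_defaults).get? (pvNormCfg config_name)
      | some ed =>
        if ed = [] then (PySem.Dict.mk flag_defaults).get? (pvNormCfg config_name)
        else
          match (PySem.Dict.mk ed).get? (pvNormCfg config_name) with
          | some v => some v
          | none => (PySem.Dict.mk flag_defaults).get? (pvNormCfg config_name)

-- _find_required_conflicts (the local 'req_norm' is inlined as 'pvNormCfg p.1')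
def find_required_conflicts_py (toggles : List (String × String)) (required_configs : List (String × String)) (flag_defaults : List (String × String)) (example_defaults : Option (List (String × String))) : List (String × String × String) :=
  required_configs.foldl (fun conflicts p =>
    match pvEffectiveValue (pvNormCfg p.1) toggles flag_defaults example_defaults with
    | some ev => if ev ≠ p.2 then conflicts ++ [(pvNormCfg p.1, p.2, ev)] else conflicts
    | none => conflicts) []

-- ===== PORT B =====
-- the merged effective-config table: dict(flag_defaults), then .update(example or {}),
-- .update(BASE_CONFIG_DEFAULTS), .update(normalized toggles) — later overlays win
def pvMergedCfg (toggles : List (String × String)) (flag_defaults : List (String × String)) (example_defaults : Option (List (String × String))) : PySem.Dict String String :=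
  ((((PySem.Dict.ofList flag_defaults).update (example_defaults.getD [])).update pvBaseDefaults.items).update (toggles.map (fun p => (pvNormCfg p.1, p.2))))

def find_required_conflicts_py_alt (toggles : List (String × String)) (required_configs : List (String × String)) (flag_defaults : List (String × String)) (example_defaults : Option (List (String × String))) : List (String × String × String) :=
  required_configs.foldl (fun conflicts p =>
    match (pvMergedCfg toggles flag_defaults example_defaults).get? (pvNormCfg (pvNormCfg p.1)) with
    | some ev => if ev ≠ p.2 then conflicts ++ [(pvNormCfg p.1, p.2, ev)] else conflicts
    | none => conflicts) []

-- ===== PRECONDITION & SPEC =====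
-- Pre_ excludes association lists with duplicate keys in a dict-typed argument: a Python dict
-- can never hold them, so which duplicate wins in the list encoding is accidental.
def Pre_find_required_conflicts_py (toggles : List (String × String)) (required_configs : List (String × String)) (flag_defaults : List (String × String)) (example_defaults : Option (List (String × String))) : Prop :=
  (required_configs.map Prod.fst).Nodup ∧ (flag_defaults.map Prod.fst).Nodup ∧ (((example_defaults.getD []).map Prod.fst)).Nodup
instance (toggles : List (String × String)) (required_configs : List (String × String)) (flag_defaults : List (String × String)) (example_defaults : Option (List (String × String))) : Decidable (Pre_find_required_conflicts_py toggles required_configs flag_defaults example_defaults) := by unfold Pre_find_required_conflicts_py; infer_instance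

def pvWitness_find_required_conflicts_py : (List (String × String)) × (List (String × String)) × (List (String × String)) × (Option (List (String × String))) :=
  ([("CONFIG_BT_ENABLED", "n")], [("BT_ENABLED", "y"), ("FOO", "y")], [("FOO", "n")], some [("BAR", "y")])

def Spec_find_required_conflicts_py (toggles : List (String × String)) (required_configs : List (String × String)) (flag_defaults : List (String × String)) (example_defaults : Option (List (String × String))) (out : List (String × String × String)) : Prop := out = find_required_conflicts_py_alt toggles required_configs flag_defaults example_defaults
instance (toggles : List (String × String)) (required_configs : List (String × String)) (flag_defaults : List (String × String)) (example_defaults : Option (List (String × String))) (out : List (String × String × String)) : Decidable (Spec_find_required_conflicts_py toggles required_configs flag_defaults example_defaults out) := by unfold Spec_find_required_conflicts_py; infer_instance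

-- ===== CLAIM (what is proved, stated in full; the proofs are below) =====
def Claim_equal_find_required_conflicts_py : Prop := ∀ (toggles : List (String × String)) (required_configs : List (String × String)) (flag_defaults : List (String × String)) (example_defaults : Option (List (String × String))), Dom_find_required_conflicts_py toggles required_configs flag_defaults example_defaults → Pre_find_required_conflicts_py toggles required_configs flag_defaults example_defaults → Spec_find_required_conflicts_py toggles required_configs flag_defaults example_defaults (find_required_conflicts_py toggles required_configs flag_defaults example_defaults)

-- ===== LEMMAS AND PROOFS =====

-- reversed first-match lookup ("last wins"), the lookup a fold of overwriting inserts realizes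
def pvRlk (l : List (String × String)) (k : String) : Option String :=
  (l.reverse.find? (fun p => p.1 == k)).map (·.2)

theorem pvDict_update_eq (d : PySem.Dict String String) (l : List (String × String)) :
    d.update l = l.foldl (fun d p => d.insert p.1 p.2) d := rfl

theorem pvDict_ofList_eq (l : List (String × String)) :
    PySem.Dict.ofList l = l.foldl (fun d p => d.insert p.1 p.2) PySem.Dict.empty := rfl

theorem pvItems_mk (l : List (String × String)) : (PySem.Dict.mk l).items = l := rfl

theorem pvGet?_mk_nil (k : String) : (PySem.Dict.mk ([] : List (String × String))).get? k = none := rfl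

-- lookup after a fold of overwriting inserts = reversed first match, else the base dict
theorem pvGet?_foldl_insert (l : List (String × String)) (d : PySem.Dict String String) (k : String) :
    (l.foldl (fun d p => d.insert p.1 p.2) d).get? k =
      match pvRlk l k with
      | some v => some v
      | none => d.get? k := by
  induction l generalizing d with
  | nil => simp [pvRlk]
  | cons q l ih =>
    simp only [List.foldl_cons, ih, pvRlk, List.reverse_cons, List.find?_append]
    cases h : l.reverse.find? (fun p => p.1 == k) with
    | some p => simp
    | none =>
      by_cases hk : q.1 = k
      · simp [hk]
      · have hk' : k ≠ q.1 := fun he => hk he.symm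
        simp [hk, hk', PySem.Dict.get?_insert]

-- first-match lookup of a literal dict
theorem pvGet?_mk (l : List (String × String)) (k : String) :
    (PySem.Dict.mk l).get? k = (l.find? (fun p => p.1 == k)).map (·.2) := by
  induction l with
  | nil => rfl
  | cons q l ih =>
    rw [show (q :: l) = (q.1, q.2) :: l by simp, PySem.Dict.get?_mk_cons]
    by_cases hk : q.1 = k <;> simp [hk, ih]

-- with unique keys, reversed first match = first match
theorem pvRlk_eq_find? (l : List (String × String)) (h : (l.map Prod.fst).Nodup) (k : String) :
    pvRlk l k = (l.find? (fun p => p.1 == k)).map (·.2) := by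
  induction l with
  | nil => rfl
  | cons q l ih =>
    simp only [List.map_cons, List.nodup_cons] at h
    by_cases hk : q.1 = k
    · have hnone : l.reverse.find? (fun p => p.1 == k) = none := by
        rw [List.find?_eq_none]
        intro p hp
        simp only [beq_iff_eq]
        intro hpk
        apply h.1
        have hmem : p.1 ∈ l.map Prod.fst := List.mem_map_of_mem (List.mem_reverse.mp hp)
        rw [hk, ← hpk]
        exact hmem
      simp [pvRlk, List.reverse_cons, List.find?_append, hnone, hk]
    · have hq : (q.1 == k) = false := by simp [hk]
      simpa [pvRlk, List.reverse_cons, List.find?_append, hq, Option.or_none] using ih h.2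

theorem pvRlk_eq_get?_mk (l : List (String × String)) (h : (l.map Prod.fst).Nodup) (k : String) :
    pvRlk l k = (PySem.Dict.mk l).get? k := by
  rw [pvRlk_eq_find? l h k, pvGet?_mk]

-- pointwise: A's fallback chain = B's merged-table lookup
theorem pvEff_eq_merged (toggles flag_defaults : List (String × String)) (example_defaults : Option (List (String × String)))
    (hfl : (flag_defaults.map Prod.fst).Nodup)
    (hex : (((example_defaults.getD []).map Prod.fst)).Nodup) (k : String) :
    pvEffectiveValue k toggles flag_defaults example_defaults =
      (pvMergedCfg toggles flag_defaults example_defaults).get? (pvNormCfg k) := by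
  have hbase : (pvBaseDefaultsList.map Prod.fst).Nodup := by decide
  have hmap : pvToggleMap toggles
      = (toggles.map (fun p => (pvNormCfg p.1, p.2))).foldl (fun d p => d.insert p.1 p.2) PySem.Dict.empty := by
    unfold pvToggleMap; rw [List.foldl_map]
  unfold pvEffectiveValue pvMergedCfg
  rw [pvDict_update_eq, pvGet?_foldl_insert, pvDict_update_eq, pvGet?_foldl_insert,
      pvDict_update_eq, pvGet?_foldl_insert, pvDict_ofList_eq, pvGet?_foldl_insert,
      hmap, pvGet?_foldl_insert]
  simp only [pvBaseDefaults, pvItems_mk]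
  rw [pvRlk_eq_get?_mk pvBaseDefaultsList hbase, pvRlk_eq_get?_mk flag_defaults hfl,
      pvRlk_eq_get?_mk _ hex]
  simp only [PySem.Dict.get?_empty]
  cases pvRlk (toggles.map fun p => (pvNormCfg p.1, p.2)) (pvNormCfg k) with
  | some v => rfl
  | none =>
    cases hB : (PySem.Dict.mk pvBaseDefaultsList).get? (pvNormCfg k) with
    | some v => simp
    | none =>
      cases example_defaults with
      | none =>
        simp only [Option.getD_none, pvGet?_mk_nil]
        cases (PySem.Dict.mk flag_defaults).get? (pvNormCfg k) <;> rfl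
      | some ed =>
        by_cases hed : ed = []
        · subst hed
          simp only [Option.getD_some, pvGet?_mk_nil]
          cases hF : (PySem.Dict.mk flag_defaults).get? (pvNormCfg k) <;> simp
        · simp only [Option.getD_some, if_neg hed]
          cases (PySem.Dict.mk ed).get? (pvNormCfg k) <;>
            cases (PySem.Dict.mk flag_defaults).get? (pvNormCfg k) <;> rfl

-- ===== VERDICT (by name: the statement is the Claim_ definition above) =====
theorem find_required_conflicts_py_spec : Claim_equal_find_required_conflicts_py := by
  intro toggles required_configs flag_defaults example_defaults _hDom hPre
  obtain ⟨_hrq, hfl, hex⟩ := hPre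
  show find_required_conflicts_py toggles required_configs flag_defaults example_defaults
      = find_required_conflicts_py_alt toggles required_configs flag_defaults example_defaults
  unfold find_required_conflicts_py find_required_conflicts_py_alt
  congr 1
  funext conflicts p
  rw [pvEff_eq_merged toggles flag_defaults example_defaults hfl hex (pvNormCfg p.1)]
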